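-- pv_equiv track=rewrite | github.com/DataStas/Working_repo | algorithms/leetcode/new/2395. Find Subarrays With Equal Sum.py | findSubarrays
-- ===== SOURCE A (Python) =====
-- def findSubarrays(nums):
--     """
--     :type nums: List[int]
--     :rtype: bool
--     """
--     d = {}
--     prev = nums[0]
--     for i in range(1, len(nums)):
--         s = prev + nums[i]
--         if s in d:
--             return True
--         else:
--             d[s] = 1
--         prev = nums[i]
--     return False
-- ===== SOURCE B (Python) =====
-- def findSubarrays(nums):
--     """
--     :type nums: List[int]
--     :rtype: bool
--     """
--     sums = sorted(nums[i] + nums[i + 1] for i in range(len(nums) - 1))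
--     return any(a == b for a, b in zip(sums, sums[1:]))
-- ===== Notes on version B (the rewrite author's own statement) =====
-- stated objective: alternative
-- what changed: Replaces A's streaming hash-membership loop by a sort-then-scan: sort the adjacent-pair sums and report whether any two consecutive entries of the sorted list are equal (no hashing).
import Mathlib
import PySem

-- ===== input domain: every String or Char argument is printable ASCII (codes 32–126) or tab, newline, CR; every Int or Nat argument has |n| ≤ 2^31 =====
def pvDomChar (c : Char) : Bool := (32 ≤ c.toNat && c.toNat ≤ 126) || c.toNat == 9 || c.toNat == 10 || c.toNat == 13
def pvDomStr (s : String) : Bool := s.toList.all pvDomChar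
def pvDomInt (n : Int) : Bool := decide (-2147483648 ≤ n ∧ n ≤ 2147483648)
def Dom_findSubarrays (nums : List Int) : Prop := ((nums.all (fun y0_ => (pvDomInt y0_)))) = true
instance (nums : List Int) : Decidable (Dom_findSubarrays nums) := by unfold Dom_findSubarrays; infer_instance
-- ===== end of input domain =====

-- B replaces A's streaming hash-membership loop by sort-then-scan: sort the adjacent-pair
-- sums and check whether any two consecutive sorted entries are equal (objective: alternative).

-- ===== PORT A =====
def findSubarraysStep (st : PySem.Dict Int Int × Int × Bool) (x : Int) :
    PySem.Dict Int Int × Int × Bool :=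
  match st with
  | (d, prev, found) =>
    if found then (d, prev, found)
    else
      let s := prev + x
      if d.contains s then (d, prev, true)
      else (d.insert s 1, x, false)

def findSubarrays (nums : List Int) : Bool :=
  ((PySem.List.pyRange 1 (nums.length : Int) 1).foldl
      (fun st i => findSubarraysStep st (PySem.List.pyGetD nums i 0))
      (PySem.Dict.empty, PySem.List.pyGetD nums 0 0, false)).2.2

-- ===== PORT B =====
def findSubarrays_alt (nums : List Int) : Bool :=
  let sums := PySem.List.sorted
    ((PySem.List.pyRange 0 ((nums.length : Int) - 1) 1).map
      (fun i => PySem.List.pyGetD nums i 0 + PySem.List.pyGetD nums (i + 1) 0))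
    (fun x => x) false
  (sums.zip sums.tail).any (fun p => p.1 == p.2)

-- ===== PRECONDITION & SPEC =====
-- A unconditionally reads the first element, so it raises IndexError on the empty list; Pre_ excludes it.
def Pre_findSubarrays (nums : List Int) : Prop := nums ≠ []
instance (nums : List Int) : Decidable (Pre_findSubarrays nums) := by
  unfold Pre_findSubarrays; infer_instance

def pvWitness_findSubarrays : List Int := [1, 2, 3, 0]

def Spec_findSubarrays (nums : List Int) (out : Bool) : Prop := out = findSubarrays_alt nums
instance (nums : List Int) (out : Bool) : Decidable (Spec_findSubarrays nums out) := by
  unfold Spec_findSubarrays; infer_instance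

-- ===== CLAIM (what is proved, stated in full; the proofs are below) =====
def Claim_equal_findSubarrays : Prop := ∀ (nums : List Int), Dom_findSubarrays nums →
  Pre_findSubarrays nums → Spec_findSubarrays nums (findSubarrays nums)

-- ===== LEMMAS AND PROOFS =====

/-- The list of adjacent-pair sums, structurally. -/
def adjSums : Int → List Int → List Int
  | _, [] => []
  | prev, y :: ys => (prev + y) :: adjSums y ys

-- ---- B side ----

/-- Index form of the adjacent-sums list. -/
theorem range_map_eq_adjSums : ∀ (xs : List Int) (x : Int),
    (List.range xs.length).map
        (fun k => (x :: xs).getD k 0 + (x :: xs).getD (k + 1) 0) = adjSums x xs := by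
  intro xs
  induction xs with
  | nil => intro x; simp [adjSums]
  | cons y ys ih =>
    intro x
    rw [show (y :: ys).length = ys.length + 1 from rfl, List.range_succ_eq_map]
    simp only [List.map_cons, List.map_map]
    rw [show ((fun k => (x :: y :: ys).getD k 0 + (x :: y :: ys).getD (k + 1) 0) ∘ Nat.succ)
        = (fun k => (y :: ys).getD k 0 + (y :: ys).getD (k + 1) 0) from rfl]
    rw [ih y]
    simp [adjSums]

/-- On a ≤-sorted list, some adjacent pair is equal iff the list has a duplicate. -/
theorem adjAny_sorted : ∀ (l : List Int), l.Pairwise (· ≤ ·) →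
    ((l.zip l.tail).any (fun p => p.1 == p.2)) = !decide l.Nodup := by
  intro l
  induction l with
  | nil => intro _; simp
  | cons a t ih =>
    intro hp
    match t, hp with
    | [], _ => simp
    | b :: u, hp =>
      have hp' : (b :: u).Pairwise (· ≤ ·) := hp.tail
      have hab : a ≤ b := (List.pairwise_cons.mp hp).1 b List.mem_cons_self
      by_cases he : a = b
      · subst he
        simp [List.zip, List.nodup_cons]
      · have hnotmem : a ∉ b :: u := by
          intro hm
          rcases List.mem_cons.mp hm with h | h
          · exact he h
          · have hbu : ∀ x ∈ u, b ≤ x := (List.pairwise_cons.mp hp').1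
            have h1 : b ≤ a := hbu a h
            exact he (le_antisymm hab h1)
        have : ((a :: b :: u).zip (a :: b :: u).tail).any (fun p => p.1 == p.2)
            = ((b :: u).zip (b :: u).tail).any (fun p => p.1 == p.2) := by
          simp [List.zip, he]
        rw [this, ih hp']
        simp [List.nodup_cons, hnotmem]

theorem alt_eq_nodup (x : Int) (xs : List Int) :
    findSubarrays_alt (x :: xs) = decide (¬ (adjSums x xs).Nodup) := by
  unfold findSubarrays_alt
  rw [show (PySem.List.pyRange 0 (((x :: xs).length : Int) - 1) 1)
      = PySem.List.pyRange 0 (((x :: xs).length : Int) - 1) from rfl]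
  rw [PySem.List.pyRange_one, List.map_map]
  rw [show (((x :: xs).length : Int) - 1 - 0).toNat = xs.length by simp]
  rw [show ((fun i => PySem.List.pyGetD (x :: xs) i 0 + PySem.List.pyGetD (x :: xs) (i + 1) 0)
        ∘ fun k : Nat => (0 : Int) + (k : Int))
      = fun k : Nat => (x :: xs).getD k 0 + (x :: xs).getD (k + 1) 0 by
    funext k
    simp only [Function.comp, zero_add]
    rw [PySem.List.pyGetD_natCast, show ((k : Int) + 1) = ((k + 1 : Nat) : Int) by push_cast; ring,
      PySem.List.pyGetD_natCast]]
  rw [range_map_eq_adjSums]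
  set s := adjSums x xs with hs
  have hperm : (PySem.List.sorted s (fun x => x) false).Perm s := PySem.List.sorted_perm s _ _
  have hpw : (PySem.List.sorted s (fun x => x) false).Pairwise (· ≤ ·) := by
    have := PySem.List.sorted_pairwise (xs := s) (key := fun x => x)
    simpa using this
  rw [adjAny_sorted _ hpw]
  by_cases hnd : s.Nodup <;> simp [hperm.nodup_iff, hnd]

-- ---- A side ----

theorem foldl_found_true (l : List Int) (d : PySem.Dict Int Int) (prev : Int) :
    (l.foldl findSubarraysStep (d, prev, true)) = (d, prev, true) := by
  induction l generalizing d prev with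
  | nil => rfl
  | cons y ys ih => simp only [List.foldl_cons, findSubarraysStep]; exact ih d prev

theorem loop_spec (rest : List Int) : ∀ (prev : Int) (d : PySem.Dict Int Int),
    (rest.foldl findSubarraysStep (d, prev, false)).2.2 =
      decide (¬ ((adjSums prev rest).Nodup ∧
        ∀ s ∈ adjSums prev rest, d.contains s = false)) := by
  induction rest with
  | nil => intro prev d; simp [adjSums]
  | cons y ys ih =>
    intro prev d
    simp only [List.foldl_cons, findSubarraysStep, if_neg Bool.false_ne_true]
    by_cases hc : d.contains (prev + y)
    · rw [if_pos hc, foldl_found_true]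
      simp only [adjSums]
      have hw : ¬ (((prev + y) :: adjSums y ys).Nodup ∧
          ∀ s ∈ (prev + y) :: adjSums y ys, d.contains s = false) := by
        rintro ⟨-, hall⟩
        have hfalse := hall (prev + y) List.mem_cons_self
        rw [hc] at hfalse
        simp at hfalse
      exact (decide_eq_true hw).symm
    · rw [if_neg hc, ih y (d.insert (prev + y) 1), decide_eq_decide]
      apply not_congr
      constructor
      · rintro ⟨hnd, hall⟩
        simp only [adjSums, List.nodup_cons]
        have hne : ∀ s ∈ adjSums y ys, s ≠ prev + y := by
          intro s hs he
          have hcs := hall s hs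
          rw [PySem.Dict.contains_insert] at hcs
          subst he
          simp at hcs
        refine ⟨⟨fun hmem => hne _ hmem rfl, hnd⟩, ?_⟩
        intro s hs
        rcases List.mem_cons.mp hs with he | hm
        · subst he; exact eq_false_of_ne_true hc
        · have hcs := hall s hm
          rw [PySem.Dict.contains_insert] at hcs
          simp only [Bool.or_eq_false_iff] at hcs
          exact hcs.2
      · rintro ⟨hnd, hall⟩
        simp only [adjSums, List.nodup_cons] at hnd
        refine ⟨hnd.2, fun s hs => ?_⟩
        rw [PySem.Dict.contains_insert]
        have h1 : d.contains s = false := hall s (List.mem_cons_of_mem _ hs)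
        have h2 : s ≠ prev + y := fun he => hnd.1 (he ▸ hs)
        simp [h1, h2]

theorem a_eq_nodup (x : Int) (xs : List Int) :
    findSubarrays (x :: xs) = decide (¬ (adjSums x xs).Nodup) := by
  unfold findSubarrays
  rw [show (PySem.List.pyRange 1 (((x :: xs).length : Nat) : Int) 1)
      = (PySem.List.pyRange 1 (((x :: xs).length : Nat) : Int)) from rfl]
  rw [PySem.List.foldl_pyRange_pyGetD' (x :: xs) 0 findSubarraysStep _ (by norm_num)]
  simp only [Int.toNat_one, List.drop_one, List.tail_cons]
  rw [PySem.List.pyGetD_zero_cons x xs 0]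
  rw [loop_spec xs x PySem.Dict.empty]
  rw [decide_eq_decide]
  simp [PySem.Dict.contains_empty]

-- ===== VERDICT (by name: the statement is the Claim_ definition above) =====
theorem findSubarrays_spec : Claim_equal_findSubarrays := by
  intro nums _ hpre
  unfold Spec_findSubarrays
  match nums with
  | [] => exact absurd rfl hpre
  | x :: xs => rw [a_eq_nodup, alt_eq_nodup]
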